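-- pv_equiv track=rewrite | github.com/shaunnorris/aoc2021 | day5/day5.py | expand_points_part1
-- ===== SOURCE A (Python) =====
-- def expand_points_part1(points_list):
--     """Part 1."""
--     expanded_points = []
--     for point_set in points_list:
--         startx = point_set[0]
--         starty = point_set[1]
--         endx = point_set[2]
--         endy = point_set[3]
--         if startx == endx or starty == endy:
--             if startx <= endx:
--                 x = list(range(startx, endx+1))
--             elif startx > endx:
--                 x = list(range(startx,endx-1,-1))
--             elif startx == endx:
--                 x = [startx]
--
--             if starty <= endy:
--                 y = list(range(starty, endy+1))
--             elif starty > endy: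
--                 y = list(range(starty,endy-1,-1))
--             elif starty == endy:
--                 y = [starty]
--
--             if len(y) == 1:
--                 y = y * len(x)
--             if len(x) == 1:
--                 x = x * len(y)
--             ziplist = list(zip(x, y))
--             for element in ziplist:
--                 newpoint = str(element[0])+":"+str(element[1])
--                 expanded_points.append(newpoint)
--     return expanded_points
-- ===== SOURCE B (Python) =====
-- def expand_points_part1(points_list):
--     """Part 1."""
--     expanded_points = []
--     for point_set in points_list:
--         startx = point_set[0]
--         starty = point_set[1]
--         endx = point_set[2]
--         endy = point_set[3]
--         if startx == endx or starty == endy: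
--             dx = endx - startx
--             dy = endy - starty
--             sx = (dx > 0) - (dx < 0)
--             sy = (dy > 0) - (dy < 0)
--             n = max(abs(dx), abs(dy)) + 1
--             for i in range(n):
--                 expanded_points.append(str(startx + i * sx) + ":" + str(starty + i * sy))
--     return expanded_points
-- ===== Notes on version B (the rewrite author's own statement) =====
-- stated objective: simpler
-- what changed: Replaces the two direction-aware range lists, singleton padding and zip with a single arithmetic walk of n = max(|dx|,|dy|)+1 steps along the sign vector (sx, sy).
import Mathlib
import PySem

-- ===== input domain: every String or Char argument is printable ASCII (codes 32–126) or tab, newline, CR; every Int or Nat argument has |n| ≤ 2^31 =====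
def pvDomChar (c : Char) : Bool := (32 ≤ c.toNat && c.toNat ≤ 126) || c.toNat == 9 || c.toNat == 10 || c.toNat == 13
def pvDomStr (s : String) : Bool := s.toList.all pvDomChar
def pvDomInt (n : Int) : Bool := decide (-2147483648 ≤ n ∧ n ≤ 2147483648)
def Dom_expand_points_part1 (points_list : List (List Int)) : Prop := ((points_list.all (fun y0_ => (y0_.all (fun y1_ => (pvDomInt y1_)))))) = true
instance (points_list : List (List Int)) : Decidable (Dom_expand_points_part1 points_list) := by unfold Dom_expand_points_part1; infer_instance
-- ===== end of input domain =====

-- B replaces A's two direction-aware range lists, singleton padding and zip by a single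
-- arithmetic walk of max(|dx|,|dy|)+1 steps along the sign vector (objective: simpler).

-- ===== PORT A =====
-- loop body of A's 'for point_set in points_list' (point_set[i] via pyGetD; Pre_ excludes
-- inner lists shorter than 4, where the Python raises IndexError)
def pvBodyA (expanded_points : List String) (point_set : List Int) : List String :=
  let startx := PySem.List.pyGetD point_set 0 0
  let starty := PySem.List.pyGetD point_set 1 0
  let endx := PySem.List.pyGetD point_set 2 0
  let endy := PySem.List.pyGetD point_set 3 0
  if startx = endx ∨ starty = endy then
    -- the 'elif startx == endx' / 'elif starty == endy' arms are unreachable (trichotomy)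
    let x := if startx ≤ endx then PySem.List.pyRange startx (endx + 1) 1
             else PySem.List.pyRange startx (endx - 1) (-1)
    let y := if starty ≤ endy then PySem.List.pyRange starty (endy + 1) 1
             else PySem.List.pyRange starty (endy - 1) (-1)
    -- Python 'y = y * len(x)' / 'x = x * len(y)': concatenated copies of the list
    let y := if y.length = 1 then (List.replicate x.length y).flatten else y
    let x := if x.length = 1 then (List.replicate y.length x).flatten else x
    let ziplist := x.zip y
    ziplist.foldl (fun acc element =>
      acc ++ [PySem.Int.toStr element.1 ++ ":" ++ PySem.Int.toStr element.2]) expanded_points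
  else expanded_points

def expand_points_part1 (points_list : List (List Int)) : List String :=
  points_list.foldl pvBodyA []

-- ===== PORT B =====
-- loop body of B: one walk of n = max(|dx|,|dy|)+1 steps along the sign vector
def pvBodyB (expanded_points : List String) (point_set : List Int) : List String :=
  let startx := PySem.List.pyGetD point_set 0 0
  let starty := PySem.List.pyGetD point_set 1 0
  let endx := PySem.List.pyGetD point_set 2 0
  let endy := PySem.List.pyGetD point_set 3 0
  if startx = endx ∨ starty = endy then
    let dx := endx - startx
    let dy := endy - starty
    -- Python '(dx > 0) - (dx < 0)': bools are 0/1 ints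
    let sx : Int := (if 0 < dx then 1 else 0) - (if dx < 0 then 1 else 0)
    let sy : Int := (if 0 < dy then 1 else 0) - (if dy < 0 then 1 else 0)
    let n : Int := max |dx| |dy| + 1
    (PySem.List.pyRange 0 n 1).foldl (fun acc i =>
      acc ++ [PySem.Int.toStr (startx + i * sx) ++ ":" ++ PySem.Int.toStr (starty + i * sy)]) expanded_points
  else expanded_points

def expand_points_part1_alt (points_list : List (List Int)) : List String :=
  points_list.foldl pvBodyB []

-- ===== PRECONDITION & SPEC =====
-- Pre_ excludes exactly the inputs on which the Python A raises IndexError: an inner list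
-- with fewer than 4 entries (point_set[0..3] is read for every segment).
def Pre_expand_points_part1 (points_list : List (List Int)) : Prop :=
  ∀ ps ∈ points_list, 4 ≤ ps.length
instance (points_list : List (List Int)) : Decidable (Pre_expand_points_part1 points_list) := by
  unfold Pre_expand_points_part1; infer_instance

def pvWitness_expand_points_part1 : List (List Int) := [[0, 0, 0, 2], [3, 1, 1, 1]]

def Spec_expand_points_part1 (points_list : List (List Int)) (out : List String) : Prop := out = expand_points_part1_alt points_list
instance (points_list : List (List Int)) (out : List String) : Decidable (Spec_expand_points_part1 points_list out) := by unfold Spec_expand_points_part1; infer_instance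

-- ===== CLAIM (what is proved, stated in full; the proofs are below) =====
def Claim_equal_expand_points_part1 : Prop := ∀ (points_list : List (List Int)), Dom_expand_points_part1 points_list → Pre_expand_points_part1 points_list → Spec_expand_points_part1 points_list (expand_points_part1 points_list)

-- ===== LEMMAS AND PROOFS =====

-- both of A's direction-aware inclusive ranges are a range-map along the sign of c - a
lemma pv_dir (a c : Int) :
    (if a ≤ c then PySem.List.pyRange a (c + 1) 1 else PySem.List.pyRange a (c - 1) (-1))
    = (List.range ((c - a).natAbs + 1)).map
        (fun (k : Nat) => a + (k : Int) * ((if 0 < c - a then (1:Int) else 0) - (if c - a < 0 then 1 else 0))) := by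
  split
  · rename_i hle
    rw [PySem.List.pyRange_one]
    have hN : (c + 1 - a).toNat = (c - a).natAbs + 1 := by omega
    rw [hN]
    apply List.map_congr_left
    intro k hk
    rw [List.mem_range] at hk
    split_ifs <;> omega
  · rename_i hgt
    rw [PySem.List.pyRange_neg_one]
    have hN : (a - (c - 1)).toNat = (c - a).natAbs + 1 := by omega
    rw [hN]
    apply List.map_congr_left
    intro k hk
    rw [List.mem_range] at hk
    split_ifs <;> omega

lemma pv_flatten_replicate_singleton {α : Type} (n : Nat) (s : α) :
    (List.replicate n [s]).flatten = List.replicate n s := by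
  induction n with
  | zero => rfl
  | succ k ih => simp [List.replicate_succ, ih]

-- core per-segment fact: A's pad-and-zip rendering equals B's sign-vector walk
lemma pv_seg (a b c d : Int) (h : a = c ∨ b = d) :
    (let x := if a ≤ c then PySem.List.pyRange a (c + 1) 1 else PySem.List.pyRange a (c - 1) (-1);
     let y := if b ≤ d then PySem.List.pyRange b (d + 1) 1 else PySem.List.pyRange b (d - 1) (-1);
     let y2 := if y.length = 1 then (List.replicate x.length y).flatten else y;
     let x2 := if x.length = 1 then (List.replicate y2.length x).flatten else x;
     (x2.zip y2).map (fun e => PySem.Int.toStr e.1 ++ ":" ++ PySem.Int.toStr e.2))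
    = (PySem.List.pyRange 0 (max |c - a| |d - b| + 1) 1).map (fun i =>
        PySem.Int.toStr (a + i * ((if 0 < c - a then (1:Int) else 0) - (if c - a < 0 then 1 else 0))) ++ ":" ++
        PySem.Int.toStr (b + i * ((if 0 < d - b then (1:Int) else 0) - (if d - b < 0 then 1 else 0)))) := by
  simp only [pv_dir, List.length_map, List.length_range]
  by_cases hac : a = c
  · subst hac
    simp only [sub_self, lt_irrefl, if_false, Int.natAbs_zero, zero_add, abs_zero, List.range_one,
      List.map_cons, List.map_nil, mul_zero, add_zero]
    by_cases hNy : (d - b).natAbs + 1 = 1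
    · have hdb : d = b := by omega
      subst hdb
      simp [PySem.List.pyRange_one]
    · simp only [if_true, if_neg hNy, List.length_map, List.length_range,
        pv_flatten_replicate_singleton]
      rw [show List.replicate ((d - b).natAbs + 1) a
            = (List.range ((d - b).natAbs + 1)).map (fun _ => a) by simp [List.map_const']]
      rw [List.zip_map', List.map_map]
      rw [PySem.List.pyRange_one]
      rw [show ((max 0 |d - b| + 1) - 0).toNat = (d - b).natAbs + 1 by
        rw [Int.abs_eq_natAbs]; omega]
      rw [List.map_map]
      apply List.map_congr_left
      intro k hk
      simp
  · have hbd : b = d := h.resolve_left hac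
    subst hbd
    simp only [sub_self, lt_irrefl, if_false, Int.natAbs_zero, zero_add, abs_zero, List.range_one,
      List.map_cons, List.map_nil, mul_zero, add_zero]
    have hNx : ¬((c - a).natAbs + 1 = 1) := by omega
    simp only [List.length_map, List.length_range, if_neg hNx, List.length_cons, if_true,
      pv_flatten_replicate_singleton]
    rw [show List.replicate ((c - a).natAbs + 1) b
          = (List.range ((c - a).natAbs + 1)).map (fun _ => b) by simp [List.map_const']]
    rw [List.zip_map', List.map_map]
    rw [PySem.List.pyRange_one]
    rw [show ((max |c - a| 0 + 1) - 0).toNat = (c - a).natAbs + 1 by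
      rw [Int.abs_eq_natAbs]; omega]
    rw [List.map_map]
    apply List.map_congr_left
    intro k hk
    simp

lemma pv_body_eq (acc : List String) (ps : List Int) : pvBodyA acc ps = pvBodyB acc ps := by
  simp only [pvBodyA, pvBodyB]
  by_cases h : PySem.List.pyGetD ps 0 0 = PySem.List.pyGetD ps 2 0 ∨
      PySem.List.pyGetD ps 1 0 = PySem.List.pyGetD ps 3 0
  · simp only [if_pos h]
    rw [PySem.List.foldl_append_singleton_eq_map, PySem.List.foldl_append_singleton_eq_map]
    exact congrArg (acc ++ ·) (pv_seg _ _ _ _ h)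
  · simp only [if_neg h]

lemma pv_fold_eq (l : List (List Int)) (acc : List String) :
    l.foldl pvBodyA acc = l.foldl pvBodyB acc := by
  induction l generalizing acc with
  | nil => rfl
  | cons ps t ih => simp only [List.foldl_cons, pv_body_eq]; exact ih _

-- ===== VERDICT (by name: the statement is the Claim_ definition above) =====
theorem expand_points_part1_spec : Claim_equal_expand_points_part1 := by
  intro l _ _
  show _ = _
  exact pv_fold_eq l []
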